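-- pv_equiv track=rewrite | github.com/adasilva33/LU_Kiwi_TSP_Challenge_2_Thesis | Litteratures/Reinforcement Learning/source_code/Read_File.py | CreateDistances
-- ===== SOURCE A (Python) =====
-- def CreateDistances(File, areas_n):
--     mydict = {}
--     for i in File:
--         if ((i[0],i[1],i[2])) in mydict.keys():
--             if mydict[(i[0],i[1],i[2])] > i[3]:
--                 mydict[(i[0],i[1],i[2])] = i[3]
--         else:
--             mydict[(i[0],i[1],i[2])] = i[3]
--     return mydict
-- ===== SOURCE B (Python) =====
-- def CreateDistances(File, areas_n):
--     # One result entry per distinct key triple, in first-occurrence order;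
--     # each value is computed by a direct scan for the minimum, instead of
--     # maintaining a running minimum in a hash accumulator.
--     keys = list(dict.fromkeys((a, b, c) for a, b, c, d in File))
--     return {k: min(d for a, b, c, d in File if (a, b, c) == k) for k in keys}
-- ===== Notes on version B (the rewrite author's own statement) =====
-- stated objective: alternative
-- what changed: Replaced the single-pass running-minimum hash accumulation with a dedup of the key triples followed by a per-key scan computing min directly.
import Mathlib
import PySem

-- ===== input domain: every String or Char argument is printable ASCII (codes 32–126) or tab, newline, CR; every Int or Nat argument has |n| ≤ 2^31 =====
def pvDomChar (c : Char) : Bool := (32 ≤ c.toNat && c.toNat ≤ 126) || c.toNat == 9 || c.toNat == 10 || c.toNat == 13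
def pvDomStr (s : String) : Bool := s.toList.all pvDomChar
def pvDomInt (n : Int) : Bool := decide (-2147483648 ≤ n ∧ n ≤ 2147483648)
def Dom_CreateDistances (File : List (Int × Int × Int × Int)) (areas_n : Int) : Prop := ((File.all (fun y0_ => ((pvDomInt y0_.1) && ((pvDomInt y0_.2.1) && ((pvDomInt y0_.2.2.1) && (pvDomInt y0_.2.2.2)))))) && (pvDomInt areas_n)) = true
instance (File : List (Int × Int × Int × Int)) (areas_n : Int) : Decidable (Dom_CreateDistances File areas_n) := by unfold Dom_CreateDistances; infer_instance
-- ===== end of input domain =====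

-- B replaces A's single-pass running-minimum hash accumulation by a dedup of the
-- key triples followed by a per-key scan computing the minimum directly (objective: alternative).

-- ===== PORT A =====
-- A's loop: a dict keyed by the triple, updated with a running minimum.
def pvStepA (d : PySem.Dict (Int × Int × Int) Int) (i : Int × Int × Int × Int) :
    PySem.Dict (Int × Int × Int) Int :=
  if d.contains (i.1, i.2.1, i.2.2.1) then
    if ((d.get? (i.1, i.2.1, i.2.2.1)).getD 0) > i.2.2.2 then
      d.insert (i.1, i.2.1, i.2.2.1) i.2.2.2
    else d
  else d.insert (i.1, i.2.1, i.2.2.1) i.2.2.2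

def CreateDistances (File : List (Int × Int × Int × Int)) (areas_n : Int) : List (Int × Int × Int × Int) :=
  ((File.foldl pvStepA PySem.Dict.empty).items).map (fun p => (p.1.1, p.1.2.1, p.1.2.2, p.2))

-- ===== PORT B =====
def CreateDistances_alt (File : List (Int × Int × Int × Int)) (areas_n : Int) : List (Int × Int × Int × Int) :=
  let keys := PySem.List.dedup (File.map (fun i => (i.1, i.2.1, i.2.2.1)))
  keys.map (fun k =>
    match PySem.List.min? ((File.filter (fun i => (i.1, i.2.1, i.2.2.1) == k)).map (fun i => i.2.2.2)) (fun y => y) with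
    | some m => (k.1, k.2.1, k.2.2, m)
    | none => (k.1, k.2.1, k.2.2, 0))  -- unreachable: every k in keys occurs in File

-- ===== PRECONDITION & SPEC =====
def Spec_CreateDistances (File : List (Int × Int × Int × Int)) (areas_n : Int) (out : List (Int × Int × Int × Int)) : Prop := out = CreateDistances_alt File areas_n
instance (File : List (Int × Int × Int × Int)) (areas_n : Int) (out : List (Int × Int × Int × Int)) : Decidable (Spec_CreateDistances File areas_n out) := by unfold Spec_CreateDistances; infer_instance

-- ===== CLAIM (what is proved, stated in full; the proofs are below) =====
def Claim_equal_CreateDistances : Prop := ∀ (File : List (Int × Int × Int × Int)) (areas_n : Int), Dom_CreateDistances File areas_n → Spec_CreateDistances File areas_n (CreateDistances File areas_n)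

-- ===== LEMMAS AND PROOFS =====

-- combine an optional running minimum with an optional list minimum
def pvOmin : Option Int → Option Int → Option Int
  | none, b => b
  | some v, none => some v
  | some v, some m => some (min v m)

def pvKey (i : Int × Int × Int × Int) : Int × Int × Int := (i.1, i.2.1, i.2.2.1)

def pvMf (l : List (Int × Int × Int × Int)) (k : Int × Int × Int) : Option Int :=
  PySem.List.min? ((l.filter (fun i => pvKey i == k)).map (fun i => i.2.2.2)) (fun y => y)

lemma pvOmin_assoc (a b c : Option Int) : pvOmin (pvOmin a b) c = pvOmin a (pvOmin b c) := by
  cases a <;> cases b <;> cases c <;> simp [pvOmin, min_assoc]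

lemma pvFoldl_min_min (t : List Int) (v r : Int) :
    t.foldl min (min v r) = min v (t.foldl min r) := by
  induction t generalizing r with
  | nil => simp
  | cons a t ih =>
    simp only [List.foldl]
    rw [min_assoc, ih]

lemma pvMf_cons (i : Int × Int × Int × Int) (l : List (Int × Int × Int × Int)) (k : Int × Int × Int) :
    pvMf (i :: l) k = if pvKey i == k then pvOmin (some i.2.2.2) (pvMf l k) else pvMf l k := by
  by_cases h : (pvKey i == k) = true
  · simp only [pvMf, List.filter_cons, h, if_true, List.map_cons, PySem.List.min?_id_cons]
    rcases hrest : (l.filter (fun i => pvKey i == k)).map (fun i => i.2.2.2) with _ | ⟨r, t⟩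
    · rw [hrest]
      simp [pvOmin, PySem.List.min?]
    · rw [hrest, PySem.List.min?_id_cons]
      simp only [List.foldl_cons, pvOmin]
      exact congrArg some (pvFoldl_min_min t i.2.2.2 r)
  · simp [pvMf, h]

lemma pvStepA_get?_ne (d : PySem.Dict (Int × Int × Int) Int) (i : Int × Int × Int × Int)
    (k : Int × Int × Int) (h : k ≠ pvKey i) :
    (pvStepA d i).get? k = d.get? k := by
  unfold pvStepA
  split_ifs <;> first
    | rfl
    | exact PySem.Dict.get?_insert_of_ne _ _ h

lemma pvStepA_get?_self (d : PySem.Dict (Int × Int × Int) Int) (i : Int × Int × Int × Int) :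
    (pvStepA d i).get? (pvKey i) = pvOmin (d.get? (pvKey i)) (some i.2.2.2) := by
  unfold pvStepA
  rcases hg : d.get? (pvKey i) with _ | v
  · have hc : d.contains (i.1, i.2.1, i.2.2.1) = false := by
      rw [PySem.Dict.contains_eq_isSome_get?]
      show ((d.get? (pvKey i)).isSome) = false
      rw [hg]; rfl
    simp [hc, PySem.Dict.get?_insert_self, pvOmin, pvKey]
  · have hc : d.contains (i.1, i.2.1, i.2.2.1) = true := by
      rw [PySem.Dict.contains_eq_isSome_get?]
      show ((d.get? (pvKey i)).isSome) = true
      rw [hg]; rfl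
    have hgd : (d.get? (i.1, i.2.1, i.2.2.1)).getD 0 = v := by
      show ((d.get? (pvKey i)).getD 0) = v
      rw [hg]; rfl
    by_cases hv : v > i.2.2.2
    · simp only [hc, if_true, hgd, hv]
      show (d.insert (pvKey i) i.2.2.2).get? (pvKey i) = _
      rw [PySem.Dict.get?_insert_self, pvOmin]
      congr 1
      omega
    · simp only [hc, if_true, hgd, hv, if_false]
      rw [hg, pvOmin]
      congr 1
      omega

lemma loop_get? (l : List (Int × Int × Int × Int)) (d : PySem.Dict (Int × Int × Int) Int)
    (k : Int × Int × Int) :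
    (l.foldl pvStepA d).get? k = pvOmin (d.get? k) (pvMf l k) := by
  induction l generalizing d with
  | nil =>
    simp only [List.foldl_nil, pvMf, List.filter_nil, List.map_nil]
    simp [PySem.List.min?]
    cases d.get? k <;> rfl
  | cons i t ih =>
    simp only [List.foldl_cons]
    rw [ih, pvMf_cons]
    by_cases h : (pvKey i == k) = true
    · have hk : k = pvKey i := (eq_of_beq h).symm
      rw [if_pos h, hk, pvStepA_get?_self, pvOmin_assoc]
    · rw [if_neg h, pvStepA_get?_ne]
      intro hk
      exact h (by rw [hk]; exact beq_self_eq_true _)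

lemma loop_keys (l : List (Int × Int × Int × Int)) (d : PySem.Dict (Int × Int × Int) Int) :
    (l.foldl pvStepA d).keys = PySem.Set.update d.keys (l.map pvKey) := by
  induction l generalizing d with
  | nil => simp [PySem.Set.update_nil]
  | cons i t ih =>
    simp only [List.foldl_cons, List.map_cons]
    rw [ih, PySem.Set.update_cons]
    congr 1
    unfold pvStepA
    by_cases hc : d.contains (i.1, i.2.1, i.2.2.1)
    · have hm : pvKey i ∈ d.keys := (PySem.Dict.contains_iff_mem_keys d (pvKey i)).mp hc
      rw [PySem.Set.add_of_mem hm]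
      simp only [hc, if_true]
      split_ifs
      · exact PySem.Dict.keys_insert_of_contains _ _ hc
      · rfl
    · have hc' : d.contains (i.1, i.2.1, i.2.2.1) = false := by
        cases h : d.contains (i.1, i.2.1, i.2.2.1)
        · rfl
        · exact absurd h hc
      have hm : pvKey i ∉ d.keys := fun hm =>
        hc ((PySem.Dict.contains_iff_mem_keys d (pvKey i)).mpr hm)
      rw [PySem.Set.add_of_not_mem hm]
      simp only [hc']
      exact PySem.Dict.keys_insert_of_not_contains _ _ hc'

-- ===== VERDICT (by name: the statement is the Claim_ definition above) =====
theorem CreateDistances_spec : Claim_equal_CreateDistances := by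
  intro File areas_n _
  unfold Spec_CreateDistances CreateDistances CreateDistances_alt
  have hkeys : (File.foldl pvStepA PySem.Dict.empty).keys
      = PySem.List.dedup (File.map (fun i => (i.1, i.2.1, i.2.2.1))) := by
    rw [loop_keys]
    show PySem.Set.update [] (File.map pvKey) = _
    rw [PySem.Set.update_nil_left, PySem.List.dedup_eq_ofList]
    rfl
  have hnd : (File.foldl pvStepA PySem.Dict.empty).keys.Nodup := by
    rw [hkeys, PySem.List.dedup_eq_ofList]
    exact PySem.Set.nodup_ofList _
  rw [PySem.Dict.items_eq_map_keys _ hnd 0, hkeys, List.map_map]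
  apply List.map_congr_left
  intro k hkmem
  have hkF : k ∈ File.map (fun i => (i.1, i.2.1, i.2.2.1)) :=
    (PySem.List.mem_dedup _ _).mp hkmem
  rcases List.mem_map.mp hkF with ⟨i, hiF, hik⟩
  have hget : (File.foldl pvStepA PySem.Dict.empty).get? k = pvMf File k := by
    rw [loop_get?]
    show pvOmin none (pvMf File k) = pvMf File k
    rfl
  rcases hm : pvMf File k with _ | m
  · exfalso
    have : (File.filter (fun i => pvKey i == k)).map (fun i => i.2.2.2) = [] :=
      (PySem.List.min?_eq_none_iff _ _).mp hm
    have hmem : i ∈ File.filter (fun i => pvKey i == k) := by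
      rw [List.mem_filter]
      exact ⟨hiF, by show ((i.1, i.2.1, i.2.2.1) == k) = true; rw [hik]; exact beq_self_eq_true _⟩
    have : (i.2.2.2) ∈ (File.filter (fun i => pvKey i == k)).map (fun i => i.2.2.2) :=
      List.mem_map.mpr ⟨i, hmem, rfl⟩
    simp_all
  · have hgd : (File.foldl pvStepA PySem.Dict.empty).getD k 0 = m := by
      rw [PySem.Dict.getD_eq_get?_getD, hget, hm]
      rfl
    show ((k.1, k.2.1, k.2.2, (File.foldl pvStepA PySem.Dict.empty).getD k 0) : Int × Int × Int × Int) = _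
    rw [hgd]
    have hm' : PySem.List.min? ((File.filter (fun i => (i.1, i.2.1, i.2.2.1) == k)).map (fun i => i.2.2.2)) (fun y => y) = some m := hm
    rw [hm']
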